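-- pv_equiv track=rewrite | github.com/robotika/osgar | subt/octomap.py | seq2xyz
-- ===== SOURCE A (Python) =====
-- def seq2xyz(seq_arr):
--     """
--     Convert octomap sequence (0..7) into XYZ coordinate
--     :param seq_arr: list of parent-child sequences for one of given type (free, occupied, unknown)
--     :return: list of XYZ boxes with their "size category" (shorted the sequence bigger the voxel)
--     """
--     xyz = []
--     if len(seq_arr) == 0:
--         return xyz
--     max_len = max([len(s) for s in seq_arr])
--     for seq in seq_arr:
--         d = 2 ** (max_len - 1)
--         x, y, z = -32767, -32767, -32767
--         for code in seq:
--             if code in [1, 3, 5, 7]: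
--                 x += d
--             if code in [2, 3, 6, 7]:
--                 y += d
--             if code in [4, 5, 6, 7]:
--                 z += d
--             d //= 2
--         xyz.append(((x, y, z), len(seq)))
--     return xyz
-- ===== SOURCE B (Python) =====
-- # Table-driven, position-weighted formulation: each code maps through a fixed
-- # child-offset table to a (dx, dy, dz) bit triple; each coordinate is then a
-- # dot product of those bits with positional weights 2**(max_len-1-i).
-- DELTA = {1: (1, 0, 0), 2: (0, 1, 0), 3: (1, 1, 0), 4: (0, 0, 1),
--          5: (1, 0, 1), 6: (0, 1, 1), 7: (1, 1, 1)}
--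
--
-- def seq2xyz(seq_arr):
--     if not seq_arr:
--         return []
--     max_len = max(map(len, seq_arr))
--     out = []
--     for seq in seq_arr:
--         ds = [DELTA.get(c, (0, 0, 0)) for c in seq]
--         ws = [1 << (max_len - 1 - i) for i in range(len(seq))]
--         x = -32767 + sum(dx * w for (dx, _, _), w in zip(ds, ws))
--         y = -32767 + sum(dy * w for (_, dy, _), w in zip(ds, ws))
--         z = -32767 + sum(dz * w for (_, _, dz), w in zip(ds, ws))
--         out.append(((x, y, z), len(seq)))
--     return out
-- ===== Notes on version B (the rewrite author's own statement) =====
-- stated objective: alternative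
-- what changed: B replaces A's stateful loop (mutable x,y,z plus a halving step d and three membership tests per code) by a table-driven dot product: codes are mapped through a fixed code->(dx,dy,dz) table and each coordinate is a sum of bits times positional weights 2**(max_len-1-i), computed per axis with no conditionals or running state.
import Mathlib
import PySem

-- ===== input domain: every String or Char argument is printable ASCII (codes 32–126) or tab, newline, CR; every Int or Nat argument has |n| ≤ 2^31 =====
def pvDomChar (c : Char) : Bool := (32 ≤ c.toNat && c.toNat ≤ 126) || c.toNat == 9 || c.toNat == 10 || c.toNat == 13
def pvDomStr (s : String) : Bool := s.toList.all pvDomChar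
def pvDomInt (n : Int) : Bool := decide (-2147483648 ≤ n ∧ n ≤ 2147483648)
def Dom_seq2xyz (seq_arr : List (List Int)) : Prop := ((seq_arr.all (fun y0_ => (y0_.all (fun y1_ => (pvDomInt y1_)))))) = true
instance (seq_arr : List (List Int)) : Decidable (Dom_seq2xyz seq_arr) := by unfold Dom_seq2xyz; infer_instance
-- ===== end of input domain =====

-- B replaces A's stateful loop (mutable x,y,z with a halving step d and membership
-- tests) by a table lookup code->(dx,dy,dz) and a per-axis dot product with the
-- positional weights 2^(max_len-1-i); same values, same cost (objective: alternative).

-- ===== PORT A =====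
-- one step of A's inner loop: state (x, y, z, d)
def stepA (st : Int × Int × Int × Int) (code : Int) : Int × Int × Int × Int :=
  let x := if code = 1 ∨ code = 3 ∨ code = 5 ∨ code = 7 then st.1 + st.2.2.2 else st.1
  let y := if code = 2 ∨ code = 3 ∨ code = 6 ∨ code = 7 then st.2.1 + st.2.2.2 else st.2.1
  let z := if code = 4 ∨ code = 5 ∨ code = 6 ∨ code = 7 then st.2.2.1 + st.2.2.2 else st.2.2.1
  (x, y, z, PySem.Int.floordiv st.2.2.2 2)

def seq2xyz (seq_arr : List (List Int)) : List ((Int × Int × Int) × Int) :=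
  match seq_arr with
  | [] => []
  | _ :: _ =>
    -- max([len(s) for s in seq_arr]) on the (nonempty) list of lengths
    let max_len : Nat := (seq_arr.map List.length).foldl max 0
    seq_arr.map (fun seq =>
      let r := seq.foldl stepA (-32767, -32767, -32767, (2 : Int) ^ (max_len - 1))
      ((r.1, r.2.1, r.2.2.1), (seq.length : Int)))

-- ===== PORT B =====
-- the module-level table DELTA (a Python dict with int keys)
def deltaTable : PySem.Dict Int (Int × Int × Int) :=
  PySem.Dict.ofList [(1, (1, 0, 0)), (2, (0, 1, 0)), (3, (1, 1, 0)), (4, (0, 0, 1)),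
                     (5, (1, 0, 1)), (6, (0, 1, 1)), (7, (1, 1, 1))]

def seq2xyz_alt (seq_arr : List (List Int)) : List ((Int × Int × Int) × Int) :=
  match seq_arr with
  | [] => []
  | _ :: _ =>
    let max_len : Nat := (seq_arr.map List.length).foldl max 0
    seq_arr.map (fun seq =>
      let ds := seq.map (fun c => PySem.Dict.getD deltaTable c (0, 0, 0))
      let ws := (List.range seq.length).map (fun i => (2 : Int) ^ (max_len - 1 - i))
      let x := -32767 + ((ds.zip ws).map (fun p => p.1.1 * p.2)).sum
      let y := -32767 + ((ds.zip ws).map (fun p => p.1.2.1 * p.2)).sum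
      let z := -32767 + ((ds.zip ws).map (fun p => p.1.2.2 * p.2)).sum
      ((x, y, z), (seq.length : Int)))

-- ===== PRECONDITION & SPEC =====
def Spec_seq2xyz (seq_arr : List (List Int)) (out : List ((Int × Int × Int) × Int)) : Prop := out = seq2xyz_alt seq_arr
instance (seq_arr : List (List Int)) (out : List ((Int × Int × Int) × Int)) : Decidable (Spec_seq2xyz seq_arr out) := by unfold Spec_seq2xyz; infer_instance

-- ===== CLAIM (what is proved, stated in full; the proofs are below) =====
def Claim_equal_seq2xyz : Prop := ∀ (seq_arr : List (List Int)), Dom_seq2xyz seq_arr → Spec_seq2xyz seq_arr (seq2xyz seq_arr)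

-- ===== LEMMAS AND PROOFS =====

-- the table lookup, characterised by A's membership conditions
lemma delta_spec (c : Int) :
    PySem.Dict.getD deltaTable c (0, 0, 0) =
      ((if c = 1 ∨ c = 3 ∨ c = 5 ∨ c = 7 then 1 else 0),
       (if c = 2 ∨ c = 3 ∨ c = 6 ∨ c = 7 then 1 else 0),
       (if c = 4 ∨ c = 5 ∨ c = 6 ∨ c = 7 then 1 else 0)) := by
  by_cases h1 : c = 1; · subst h1; decide
  by_cases h2 : c = 2; · subst h2; decide
  by_cases h3 : c = 3; · subst h3; decide
  by_cases h4 : c = 4; · subst h4; decide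
  by_cases h5 : c = 5; · subst h5; decide
  by_cases h6 : c = 6; · subst h6; decide
  by_cases h7 : c = 7; · subst h7; decide
  simp [deltaTable, PySem.Dict.ofList, PySem.Dict.update, PySem.Dict.getD_insert,
        PySem.Dict.getD_empty, h1, h2, h3, h4, h5, h6, h7]

-- recursive form of the weighted sum both sides compute
def wsum (pick : (Int × Int × Int) → Int) (seq : List Int) (k : Nat) : Int :=
  match seq with
  | [] => 0
  | c :: t => pick (PySem.Dict.getD deltaTable c (0, 0, 0)) * 2 ^ k + wsum pick t (k - 1)

lemma floordiv_pow_two (k : Nat) :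
    PySem.Int.floordiv ((2 : Int) ^ (k + 1)) 2 = (2 : Int) ^ k := by
  rw [PySem.Int.floordiv_eq_ediv_of_pos (by norm_num)]
  rw [pow_succ]
  exact Int.mul_ediv_cancel _ (by norm_num)

-- A's inner fold started with step size 2^k, coordinate by coordinate
lemma inner_eq (seq : List Int) : ∀ (x y z : Int) (k : Nat), seq.length ≤ k + 1 →
    (seq.foldl stepA (x, y, z, (2 : Int) ^ k)).1 = x + wsum (·.1) seq k ∧
    (seq.foldl stepA (x, y, z, (2 : Int) ^ k)).2.1 = y + wsum (·.2.1) seq k ∧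
    (seq.foldl stepA (x, y, z, (2 : Int) ^ k)).2.2.1 = z + wsum (·.2.2) seq k := by
  induction seq with
  | nil => intro x y z k _; simp [wsum]
  | cons h t ih =>
    intro x y z k hlen
    simp only [List.length_cons] at hlen
    match k, hlen with
    | 0, hlen =>
      have ht : t = [] := List.eq_nil_of_length_eq_zero (by omega)
      subst ht
      simp only [List.foldl_cons, List.foldl_nil, stepA, wsum, delta_spec]
      refine ⟨?_, ?_, ?_⟩ <;> split <;> simp
    | (k' + 1), hlen =>
      have ht : t.length ≤ k' + 1 := by omega
      simp only [List.foldl_cons, stepA, floordiv_pow_two]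
      obtain ⟨hx, hy, hz⟩ :=
        ih (if h = 1 ∨ h = 3 ∨ h = 5 ∨ h = 7 then x + (2:Int) ^ (k' + 1) else x)
           (if h = 2 ∨ h = 3 ∨ h = 6 ∨ h = 7 then y + (2:Int) ^ (k' + 1) else y)
           (if h = 4 ∨ h = 5 ∨ h = 6 ∨ h = 7 then z + (2:Int) ^ (k' + 1) else z) k' ht
      simp only [wsum, delta_spec, Nat.add_sub_cancel]
      refine ⟨?_, ?_, ?_⟩
      · rw [hx]; split_ifs <;> ring
      · rw [hy]; split_ifs <;> ring
      · rw [hz]; split_ifs <;> ring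

-- B's zip-with-weights dot product equals the same recursive sum
lemma zip_sum_eq (pick : (Int × Int × Int) → Int) (seq : List Int) : ∀ (k : Nat),
    (((seq.map (fun c => PySem.Dict.getD deltaTable c (0, 0, 0))).zip
        ((List.range seq.length).map (fun i => (2 : Int) ^ (k - i)))).map
      (fun p => pick p.1 * p.2)).sum = wsum pick seq k := by
  induction seq with
  | nil => intro k; simp [wsum]
  | cons h t ih =>
    intro k
    simp only [List.map_cons, List.length_cons, List.range_succ_eq_map, List.map_map,
      List.zip_cons_cons, List.sum_cons, wsum]
    have hw : ((fun i => (2 : Int) ^ (k - i)) ∘ Nat.succ) = (fun i => (2 : Int) ^ (k - 1 - i)) := by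
      funext i
      show (2 : Int) ^ (k - (i + 1)) = 2 ^ (k - 1 - i)
      rw [show k - (i + 1) = k - 1 - i by omega]
    rw [hw, ih]
    simp

lemma le_foldl_max (l : List Nat) : ∀ (i : Nat), i ≤ l.foldl max i ∧ ∀ a ∈ l, a ≤ l.foldl max i := by
  induction l with
  | nil => simp
  | cons h t ih =>
    intro i
    obtain ⟨h1, h2⟩ := ih (max i h)
    refine ⟨le_trans (le_max_left _ _) h1, ?_⟩
    intro a ha
    rcases List.mem_cons.mp ha with rfl | ha
    · exact le_trans (le_max_right _ _) h1
    · exact h2 a ha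

-- ===== VERDICT (by name: the statement is the Claim_ definition above) =====
theorem seq2xyz_spec : Claim_equal_seq2xyz := by
  intro seq_arr _
  unfold Spec_seq2xyz seq2xyz seq2xyz_alt
  match seq_arr with
  | [] => rfl
  | s0 :: rest =>
    simp only []
    apply List.map_congr_left
    intro seq hseq
    set ml : Nat := ((s0 :: rest).map List.length).foldl max 0 with hml
    have hle : seq.length ≤ ml :=
      (le_foldl_max ((s0 :: rest).map List.length) 0).2 _ (List.mem_map_of_mem hseq)
    obtain ⟨hx, hy, hz⟩ := inner_eq seq (-32767) (-32767) (-32767) (ml - 1) (by omega)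
    simp only [hx, hy, hz]
    rw [zip_sum_eq (fun v => v.1) seq (ml - 1), zip_sum_eq (fun v => v.2.1) seq (ml - 1),
        zip_sum_eq (fun v => v.2.2) seq (ml - 1)]
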